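-- pv_equiv track=rewrite | github.com/baebaemin/Solved_Algorithm | 프로그래머스/unrated/250136. ［PCCP 기출문제］ 2번 ／ 석유 시추/［PCCP 기출문제］ 2번 ／ 석유 시추.py | solution
-- ===== SOURCE A (Python) =====
-- from collections import deque
--
-- def bfs(i, j, H, W, land, visited, cnt_dict, idx):
--     q = deque()
--     q.append((i, j))
--     visited[i][j] = idx
--     cnt = 1
--
--     while q:
--         ci, cj = q.popleft()
--         for di, dj in ((-1, 0), (1, 0), (0, -1), (0, 1)):
--             ni, nj = di+ci, dj+cj
--             if 0 <= ni < H and 0 <= nj < W and land[ni][nj] == 1 and not visited[ni][nj]: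
--                 visited[ni][nj] = idx
--                 cnt += 1
--                 q.append((ni, nj))
--     cnt_dict[idx] = cnt
--     idx += 1
--
-- def solution(land):
--     idx = 1
--     H = len(land)    # 세로
--     W = len(land[0]) # 가로
--     visited = [[0] * W for _ in range(H)]
--     cnt_dict = {}
--
--     for i in range(H):
--         for j in range(W):
--             if land[i][j] and not visited[i][j]:
--                 bfs(i, j, H, W, land, visited, cnt_dict, idx)
--                 idx += 1
--
--     visited = list(map(list, zip(*visited)))  # 전치행렬
--     lst = [[] for _ in range(W)]
--     for i, l in enumerate(visited):
--         lst[i] = set(l)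
--     unique_lst = list(map(set, set(map(frozenset, lst))))
--
--     maxV = 0
--     for unique_set in unique_lst:
--         cnt = 0
--         for u in unique_set:
--             if u:
--                 cnt += cnt_dict[u]
--         maxV = max(cnt, maxV)
--     return maxV
-- ===== SOURCE B (Python) =====
-- def solution(land):
--     H = len(land)
--     W = len(land[0])
--     visited = [[False] * W for _ in range(H)]
--     col_total = [0] * W
--     for i in range(H):
--         for j in range(W):
--             if land[i][j] and not visited[i][j]:
--                 queue = [(i, j)]
--                 visited[i][j] = True
--                 size = 0
--                 cols = set()
--                 head = 0
--                 while head < len(queue):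
--                     ci, cj = queue[head]
--                     head += 1
--                     size += 1
--                     cols.add(cj)
--                     for ni, nj in ((ci - 1, cj), (ci + 1, cj), (ci, cj - 1), (ci, cj + 1)):
--                         if 0 <= ni < H and 0 <= nj < W and land[ni][nj] == 1 and not visited[ni][nj]:
--                             visited[ni][nj] = True
--                             queue.append((ni, nj))
--                 for c in cols:
--                     col_total[c] += size
--     best = 0
--     for total in col_total:
--         best = max(best, total)
--     return best
-- ===== Notes on version B (the rewrite author's own statement) =====
-- stated objective: simpler
-- what changed: B replaces A's label-matrix + per-component count dict + transpose + per-column label-set + frozenset-dedup pipeline by a boolean-visited flood fill that records each component's size and set of occupied columns and adds the size directly into a per-column total array, returning the maximum total.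
import Mathlib
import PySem

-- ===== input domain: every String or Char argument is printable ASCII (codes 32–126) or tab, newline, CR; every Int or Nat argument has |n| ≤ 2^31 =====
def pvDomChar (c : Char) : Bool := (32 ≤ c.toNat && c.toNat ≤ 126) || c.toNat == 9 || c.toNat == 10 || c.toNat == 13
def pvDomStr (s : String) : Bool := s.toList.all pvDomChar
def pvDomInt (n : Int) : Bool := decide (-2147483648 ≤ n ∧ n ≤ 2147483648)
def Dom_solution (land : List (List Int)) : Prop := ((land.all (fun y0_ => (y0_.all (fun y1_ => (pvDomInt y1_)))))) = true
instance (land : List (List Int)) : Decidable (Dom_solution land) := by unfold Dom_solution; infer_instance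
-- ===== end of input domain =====

-- B replaces A's label matrix + count dict + transpose + per-column label-sets + frozenset dedup
-- by a boolean-visited flood fill that adds each component's size directly into per-column totals.

-- shared grid primitives (2-d reads/writes, Python's g[i][j] on in-range indices)
def atI (g : List (List Int)) (i j : Nat) : Int := (g.getD i []).getD j 0
def atB (g : List (List Bool)) (i j : Nat) : Bool := (g.getD i []).getD j false
def setI (g : List (List Int)) (i j : Nat) (x : Int) : List (List Int) :=
  g.set i ((g.getD i []).set j x)
def setB (g : List (List Bool)) (i j : Nat) (x : Bool) : List (List Bool) :=
  g.set i ((g.getD i []).set j x)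

-- ===== PORT A =====

-- the ((-1,0),(1,0),(0,-1),(0,1)) tuple of A's bfs
def offsA : List (Int × Int) := [(-1, 0), (1, 0), (0, -1), (0, 1)]

-- the body of the 'for di, dj in …' loop of A's bfs
def stepA (land : List (List Int)) (H W : Nat) (idx : Int) (c : Nat × Nat)
    (s : List (Nat × Nat) × List (List Int) × Int) (d : Int × Int) :
    List (Nat × Nat) × List (List Int) × Int :=
  let ni : Int := d.1 + (c.1 : Int)
  let nj : Int := d.2 + (c.2 : Int)
  if decide (0 ≤ ni) && decide (ni < (H : Int)) && decide (0 ≤ nj) && decide (nj < (W : Int))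
      && (atI land ni.toNat nj.toNat == 1) && (atI s.2.1 ni.toNat nj.toNat == 0) then
    (s.1 ++ [(ni.toNat, nj.toNat)], setI s.2.1 ni.toNat nj.toNat idx, s.2.2 + 1)
  else s

-- A's 'while q:' loop (fuel makes it total; H*W+1 steps always suffice, each pop
-- removes one queue entry and each push turns one 0-cell of visited into idx)
def bfsA (land : List (List Int)) (H W : Nat) (idx : Int) :
    Nat → List (Nat × Nat) → List (List Int) → Int → List (List Int) × Int
  | 0, _, v, cnt => (v, cnt)
  | f + 1, q, v, cnt =>
    match q with
    | [] => (v, cnt)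
    | c :: q' =>
      let s := offsA.foldl (stepA land H W idx c) (q', v, cnt)
      bfsA land H W idx f s.1 s.2.1 s.2.2

-- column j of the H×W matrix v (zip(*visited) of the rectangular visited is the list of its W columns)
def colOf (v : List (List Int)) (j : Nat) : List Int := v.map (fun r => r.getD j 0)

-- 'cnt = 0; for u in unique_set: if u: cnt += cnt_dict[u]' — every nonzero label is a key of
-- cnt_dict, so cnt_dict[u] never raises and getD is exact; sum order cannot affect the total
def setSum (dict : PySem.Dict Int Int) (s : List Int) : Int :=
  s.foldl (fun c u => if u == 0 then c else c + dict.getD u 0) 0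

-- 'set(map(frozenset, lst))' : dedup by set equality, first occurrence kept; the python set's
-- iteration order is not modelled, but the final max below is order-independent
def dedupSets (ls : List (PySem.Set Int)) : List (PySem.Set Int) :=
  ls.foldl (fun acc s => if acc.any (fun t => PySem.Set.equal t s) then acc else acc ++ [s]) []

-- the double 'for i in range(H): for j in range(W):' seed scan of A's solution
def fillA (land : List (List Int)) (H W : Nat) :
    List (List Int) × PySem.Dict Int Int × Int :=
  (List.range H).foldl (fun st i =>
    (List.range W).foldl (fun (st : List (List Int) × PySem.Dict Int Int × Int) j =>
      if (atI land i j != 0) && (atI st.1 i j == 0) then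
        let r := bfsA land H W st.2.2 (H * W + 1) [(i, j)] (setI st.1 i j st.2.2) 1
        (r.1, st.2.1.insert st.2.2 r.2, st.2.2 + 1)
      else st) st)
    (List.replicate H (List.replicate W (0 : Int)), PySem.Dict.empty, 1)

def solution (land : List (List Int)) : Int :=
  let H := land.length
  let W := (land.headD []).length
  let st := fillA land H W
  -- visited = zip(*visited); lst[i] = set(l) — the W column sets, in column order
  let lst := (List.range W).map (fun j => PySem.Set.ofList (colOf st.1 j))
  let uniq := dedupSets lst
  uniq.foldl (fun m s => max (setSum st.2.1 s) m) 0

-- ===== PORT B =====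

def offsB : List (Int × Int) := [(-1, 0), (1, 0), (0, -1), (0, 1)]

-- the body of B's neighbour loop
def stepB (land : List (List Int)) (H W : Nat) (c : Nat × Nat)
    (s : List (Nat × Nat) × List (List Bool)) (d : Int × Int) :
    List (Nat × Nat) × List (List Bool) :=
  let ni : Int := d.1 + (c.1 : Int)
  let nj : Int := d.2 + (c.2 : Int)
  if decide (0 ≤ ni) && decide (ni < (H : Int)) && decide (0 ≤ nj) && decide (nj < (W : Int))
      && (atI land ni.toNat nj.toNat == 1) && !(atB s.2 ni.toNat nj.toNat) then
    (s.1 ++ [(ni.toNat, nj.toNat)], setB s.2 ni.toNat nj.toNat true)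
  else s

-- B's 'while head < len(queue):' loop (same fuel bound as A's while loop)
def bfsB (land : List (List Int)) (H W : Nat) :
    Nat → List (Nat × Nat) → List (List Bool) → Int → PySem.Set Nat →
    List (List Bool) × Int × PySem.Set Nat
  | 0, _, v, size, cols => (v, size, cols)
  | f + 1, q, v, size, cols =>
    match q with
    | [] => (v, size, cols)
    | c :: q' =>
      let s := offsB.foldl (stepB land H W c) (q', v)
      bfsB land H W f s.1 s.2 (size + 1) (PySem.Set.add cols c.2)

def solution_alt (land : List (List Int)) : Int :=
  let H := land.length
  let W := (land.headD []).length
  let st := (List.range H).foldl (fun st i =>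
    (List.range W).foldl (fun (st : List (List Bool) × List Int) j =>
      if (atI land i j != 0) && !(atB st.1 i j) then
        let r := bfsB land H W (H * W + 1) [(i, j)] (setB st.1 i j true) 0 PySem.Set.empty
        -- 'for c in cols: col_total[c] += size' — commuting increments, any set order gives this
        (r.1, r.2.2.foldl (fun ct c => ct.set c (ct.getD c 0 + r.2.1)) st.2)
      else st) st)
    (List.replicate H (List.replicate W false), List.replicate W (0 : Int))
  st.2.foldl (fun b t => max b t) 0

-- ===== PRECONDITION & SPEC =====
-- A raises IndexError on land = [] (land[0]) and whenever some row is shorter than row 0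
-- (land[i][j] for j < W); Pre_ excludes exactly those inputs.
def Pre_solution (land : List (List Int)) : Prop :=
  land ≠ [] ∧ ∀ r ∈ land, (land.headD []).length ≤ r.length
instance (land : List (List Int)) : Decidable (Pre_solution land) := by
  unfold Pre_solution; infer_instance
def pvWitness_solution : List (List Int) := [[1, 0, 1], [1, 1, 0]]

def Spec_solution (land : List (List Int)) (out : Int) : Prop := out = solution_alt land
instance (land : List (List Int)) (out : Int) : Decidable (Spec_solution land out) := by
  unfold Spec_solution; infer_instance

-- ===== CLAIM (what is proved, stated in full; the proofs are below) =====
def Claim_equal_solution : Prop :=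
  ∀ (land : List (List Int)), Dom_solution land → Pre_solution land →
    Spec_solution land (solution land)

-- ===== LEMMAS AND PROOFS =====

def Dims {α : Type} (H W : Nat) (v : List (List α)) : Prop :=
  v.length = H ∧ ∀ r ∈ v, r.length = W

def RelV (vA : List (List Int)) (vB : List (List Bool)) : Prop :=
  vB = vA.map (fun r => r.map (fun x => !(x == 0)))

def zerosV (v : List (List Int)) : Nat := (v.map (fun r => r.count 0)).sum

def colSum (dict : PySem.Dict Int Int) (col : List Int) : Int :=
  ∑ u ∈ col.toFinset.erase 0, dict.getD u 0

-- getD through map, matching defaults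
theorem getD_map' {α β : Type} (f : α → β) (l : List α) (n : Nat) (d : α) :
    (l.map f).getD n (f d) = f (l.getD n d) := by
  simp only [List.getD_eq_getElem?_getD, List.getElem?_map]
  cases l[n]? <;> simp

theorem atB_rel {vA : List (List Int)} {vB : List (List Bool)} (h : RelV vA vB) (i j : Nat) :
    atB vB i j = !(atI vA i j == 0) := by
  subst h
  show ((vA.map (fun r => r.map (fun x => !(x == 0)))).getD i []).getD j false
      = !(atI vA i j == 0)
  have h1 : (vA.map (fun r => r.map (fun x => !(x == 0)))).getD i []
      = (vA.getD i []).map (fun x => !(x == 0)) := by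
    simpa using getD_map' (fun r => r.map (fun x : Int => !(x == 0))) vA i []
  rw [h1]
  have h2 := getD_map' (fun x : Int => !(x == 0)) (vA.getD i []) j 0
  simpa using h2

theorem relV_set {vA : List (List Int)} {vB : List (List Bool)} (h : RelV vA vB)
    (i j : Nat) (x : Int) : RelV (setI vA i j x) (setB vB i j (!(x == 0))) := by
  subst h
  show setB (vA.map _) i j _ = (setI vA i j x).map _
  unfold setI setB
  rw [List.map_set]
  congr 1
  have h1 : (vA.map (fun r => r.map (fun x => !(x == 0)))).getD i []
      = (vA.getD i []).map (fun x => !(x == 0)) := by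
    simpa using getD_map' (fun r => r.map (fun x : Int => !(x == 0))) vA i []
  rw [h1, List.map_set]

theorem atI_set (v : List (List Int)) (i j : Nat) (x : Int) (i' j' : Nat)
    (hi : i < v.length) (hj : j < (v.getD i []).length) :
    atI (setI v i j x) i' j' = if i' = i ∧ j' = j then x else atI v i' j' := by
  unfold atI setI
  by_cases hii : i' = i
  · subst hii
    have h1 : (v.set i' ((v.getD i' []).set j x)).getD i' [] = (v.getD i' []).set j x := by
      rw [List.getD_eq_getElem?_getD, List.getElem?_set_self hi]; rfl
    rw [h1]
    by_cases hjj : j' = j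
    · subst hjj
      rw [List.getD_eq_getElem?_getD, List.getElem?_set_self hj]
      simp
    · rw [List.getD_eq_getElem?_getD, List.getElem?_set_ne (by omega : j ≠ j'),
        ← List.getD_eq_getElem?_getD]
      simp [hjj]
  · have h1 : (v.set i ((v.getD i []).set j x)).getD i' [] = v.getD i' [] := by
      rw [List.getD_eq_getElem?_getD, List.getElem?_set_ne (by omega : i ≠ i'),
        ← List.getD_eq_getElem?_getD]
    rw [h1]
    simp [hii]

theorem dims_set {H W : Nat} {v : List (List Int)} (hd : Dims H W v) (i j : Nat) (x : Int)
    (hi : i < v.length) : Dims H W (setI v i j x) := by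
  obtain ⟨hl, hr⟩ := hd
  refine ⟨by simpa [setI] using hl, ?_⟩
  intro r hrm
  rcases List.mem_or_eq_of_mem_set hrm with h | h
  · exact hr r h
  · subst h
    rw [List.length_set]
    have hm : v.getD i [] ∈ v := by
      rw [List.getD_eq_getElem v [] hi]
      exact List.getElem_mem hi
    exact hr _ hm

theorem atI_zero_of_ge {v : List (List Int)} {i : Nat} (j : Nat) (h : v.length ≤ i) :
    atI v i j = 0 := by
  simp [atI, List.getD_eq_getElem?_getD, List.getElem?_eq_none h]

theorem count_set_zero (r : List Int) (j : Nat) (x : Int) (hj : j < r.length)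
    (h0 : r.getD j 0 = 0) (hx : x ≠ 0) : (r.set j x).count 0 + 1 = r.count 0 := by
  induction r generalizing j with
  | nil => simp at hj
  | cons a t ih =>
    cases j with
    | zero =>
      simp at h0; subst h0
      simp [hx]
    | succ j =>
      have hset : (a :: t).set (j+1) x = a :: t.set j x := rfl
      rw [hset]
      have := ih j (by simpa using hj) (by simpa using h0)
      simp only [List.count_cons]
      omega

theorem zerosV_set (v : List (List Int)) (i j : Nat) (x : Int)
    (hi : i < v.length) (hj : j < (v.getD i []).length)
    (h0 : atI v i j = 0) (hx : x ≠ 0) : zerosV (setI v i j x) + 1 = zerosV v := by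
  induction v generalizing i with
  | nil => simp at hi
  | cons r t ih =>
    cases i with
    | zero =>
      show zerosV ((r.set j x) :: t) + 1 = zerosV (r :: t)
      simp only [zerosV, List.map_cons, List.sum_cons]
      have := count_set_zero r j x (by simpa using hj) (by simpa [atI] using h0) hx
      omega
    | succ i =>
      show zerosV (r :: setI t i j x) + 1 = zerosV (r :: t)
      simp only [zerosV, List.map_cons, List.sum_cons]
      have := ih i (by simpa using hi) (by simpa [atI] using hj)
        (by simpa [atI] using h0)
      simp only [zerosV] at this
      omega

theorem row_len {H W : Nat} {v : List (List Int)} (hd : Dims H W v) {i : Nat} (hi : i < H) :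
    (v.getD i []).length = W := by
  have hi' : i < v.length := by rw [hd.1]; exact hi
  rw [List.getD_eq_getElem v [] hi']
  exact hd.2 _ (List.getElem_mem hi')

def FoldPost (H W : Nat) (idx : Int) (q : List (Nat × Nat)) (vA : List (List Int))
    (cnt : Int) (sA : List (Nat × Nat) × List (List Int) × Int)
    (sB : List (Nat × Nat) × List (List Bool)) : Prop :=
  Dims H W sA.2.1 ∧ RelV sA.2.1 sB.2 ∧ sB.1 = sA.1 ∧
  ∃ new : List (Nat × Nat), sA.1 = q ++ new ∧ (∀ p ∈ new, p.1 < H ∧ p.2 < W) ∧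
    sA.2.2 = cnt + (new.length : Int) ∧
    zerosV sA.2.1 + new.length = zerosV vA ∧
    (∀ i j, atI sA.2.1 i j = idx ↔ (atI vA i j = idx ∨ (i, j) ∈ new)) ∧
    (∀ i j, atI sA.2.1 i j = atI vA i j ∨ (atI vA i j = 0 ∧ atI sA.2.1 i j = idx))

theorem fold_sim (land : List (List Int)) (H W : Nat) (idx : Int) (hIdx : 1 ≤ idx)
    (c : Nat × Nat) (ds : List (Int × Int)) :
    ∀ (q : List (Nat × Nat)) (vA : List (List Int)) (vB : List (List Bool)) (cnt : Int),
    Dims H W vA → RelV vA vB →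
    FoldPost H W idx q vA cnt (ds.foldl (stepA land H W idx c) (q, vA, cnt))
      (ds.foldl (stepB land H W c) (q, vB)) := by
  induction ds with
  | nil =>
    intro q vA vB cnt hd hr
    refine ⟨hd, hr, rfl, [], by simp, by simp, by simp, by simp, by simp, fun i j => Or.inl rfl⟩
  | cons d ds ih =>
    intro q vA vB cnt hd hr
    rw [List.foldl_cons, List.foldl_cons]
    have hcond : (decide (0 ≤ d.1 + (c.1 : Int)) && decide (d.1 + (c.1 : Int) < (H : Int))
        && decide (0 ≤ d.2 + (c.2 : Int)) && decide (d.2 + (c.2 : Int) < (W : Int))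
        && (atI land (d.1 + (c.1 : Int)).toNat (d.2 + (c.2 : Int)).toNat == 1)
        && !(atB vB (d.1 + (c.1 : Int)).toNat (d.2 + (c.2 : Int)).toNat))
        = (decide (0 ≤ d.1 + (c.1 : Int)) && decide (d.1 + (c.1 : Int) < (H : Int))
        && decide (0 ≤ d.2 + (c.2 : Int)) && decide (d.2 + (c.2 : Int) < (W : Int))
        && (atI land (d.1 + (c.1 : Int)).toNat (d.2 + (c.2 : Int)).toNat == 1)
        && (atI vA (d.1 + (c.1 : Int)).toNat (d.2 + (c.2 : Int)).toNat == 0)) := by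
      rw [atB_rel hr, Bool.not_not]
    by_cases hc : (decide (0 ≤ d.1 + (c.1 : Int)) && decide (d.1 + (c.1 : Int) < (H : Int))
        && decide (0 ≤ d.2 + (c.2 : Int)) && decide (d.2 + (c.2 : Int) < (W : Int))
        && (atI land (d.1 + (c.1 : Int)).toNat (d.2 + (c.2 : Int)).toNat == 1)
        && (atI vA (d.1 + (c.1 : Int)).toNat (d.2 + (c.2 : Int)).toNat == 0)) = true
    · -- push-and-mark step
      have hstepA : stepA land H W idx c (q, vA, cnt) d
          = (q ++ [((d.1 + (c.1 : Int)).toNat, (d.2 + (c.2 : Int)).toNat)],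
             setI vA (d.1 + (c.1 : Int)).toNat (d.2 + (c.2 : Int)).toNat idx, cnt + 1) := by
        simp only [stepA]
        rw [if_pos hc]
      have hstepB : stepB land H W c (q, vB) d
          = (q ++ [((d.1 + (c.1 : Int)).toNat, (d.2 + (c.2 : Int)).toNat)],
             setB vB (d.1 + (c.1 : Int)).toNat (d.2 + (c.2 : Int)).toNat true) := by
        simp only [stepB]
        rw [hcond, if_pos hc]
      rw [hstepA, hstepB]
      set i0 := (d.1 + (c.1 : Int)).toNat with hi0
      set j0 := (d.2 + (c.2 : Int)).toNat with hj0
      simp only [Bool.and_eq_true, decide_eq_true_eq, beq_iff_eq] at hc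
      obtain ⟨⟨⟨⟨⟨h1, h2⟩, h3⟩, h4⟩, h5⟩, h6⟩ := hc
      have hi0H : i0 < H := by rw [hi0]; omega
      have hj0W : j0 < W := by rw [hj0]; omega
      have hi0len : i0 < vA.length := by have := hd.1; omega
      have hj0len : j0 < (vA.getD i0 []).length := by rw [row_len hd hi0H]; exact hj0W
      have hidx0 : idx ≠ 0 := by omega
      have hbtrue : (!(idx == 0)) = true := by simp [hidx0]
      have hrel' : RelV (setI vA i0 j0 idx) (setB vB i0 j0 true) := by
        have := relV_set hr i0 j0 idx
        rwa [hbtrue] at this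
      have hd' : Dims H W (setI vA i0 j0 idx) := dims_set hd i0 j0 idx hi0len
      have hat : ∀ i j, atI (setI vA i0 j0 idx) i j
          = if i = i0 ∧ j = j0 then idx else atI vA i j :=
        fun i j => atI_set vA i0 j0 idx i j hi0len hj0len
      obtain ⟨hd2, hr2, hq2, new, hnew1, hnew2, hnew3, hnew4, hnew5, hnew6⟩ :=
        ih (q ++ [(i0, j0)]) (setI vA i0 j0 idx) (setB vB i0 j0 true) (cnt + 1) hd' hrel'
      refine ⟨hd2, hr2, hq2, (i0, j0) :: new, ?_, ?_, ?_, ?_, ?_, ?_⟩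
      · rw [hnew1, List.append_assoc]; rfl
      · intro p hp
        rcases List.mem_cons.mp hp with h | h
        · subst h; exact ⟨hi0H, hj0W⟩
        · exact hnew2 p h
      · rw [hnew3]; simp only [List.length_cons]; push_cast; ring
      · have hz := zerosV_set vA i0 j0 idx hi0len hj0len h6 hidx0
        simp only [List.length_cons]
        omega
      · intro i j
        rw [hnew5 i j, hat i j]
        by_cases hij : i = i0 ∧ j = j0
        · obtain ⟨hh1, hh2⟩ := hij
          subst hh1; subst hh2
          simp
        · rw [if_neg hij]
          constructor
          · rintro (h | h)
            · exact Or.inl h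
            · exact Or.inr (List.mem_cons_of_mem _ h)
          · rintro (h | h)
            · exact Or.inl h
            · rcases List.mem_cons.mp h with h | h
              · exact absurd ⟨congrArg Prod.fst h, congrArg Prod.snd h⟩ hij
              · exact Or.inr h
      · intro i j
        rcases hnew6 i j with h | h
        · rw [h, hat i j]
          by_cases hij : i = i0 ∧ j = j0
          · obtain ⟨hh1, hh2⟩ := hij
            subst hh1; subst hh2
            exact Or.inr ⟨h6, by rw [if_pos ⟨rfl, rfl⟩]⟩
          · rw [if_neg hij]
            exact Or.inl rfl
        · obtain ⟨hz, hv⟩ := h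
          rw [hat i j] at hz
          by_cases hij : i = i0 ∧ j = j0
          · rw [if_pos hij] at hz
            omega
          · rw [if_neg hij] at hz
            exact Or.inr ⟨hz, hv⟩
    · -- no-op step
      have hstepA : stepA land H W idx c (q, vA, cnt) d = (q, vA, cnt) := by
        simp only [stepA]
        rw [if_neg (by simpa using hc)]
      have hstepB : stepB land H W c (q, vB) d = (q, vB) := by
        simp only [stepB]
        rw [hcond, if_neg (by simpa using hc)]
      rw [hstepA, hstepB]
      exact ih q vA vB cnt hd hr

def BfsPost (H W : Nat) (idx : Int) (vA : List (List Int))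
    (rA : List (List Int) × Int) (rB : List (List Bool) × Int × PySem.Set Nat) : Prop :=
  Dims H W rA.1 ∧ RelV rA.1 rB.1 ∧ rA.2 = rB.2.1 ∧
  (∀ i j, atI rA.1 i j = atI vA i j ∨ (atI vA i j = 0 ∧ atI rA.1 i j = idx)) ∧
  (∀ j, (∃ i, atI rA.1 i j = idx) ↔ j ∈ rB.2.2) ∧
  rB.2.2.Nodup ∧ (∀ x ∈ rB.2.2, x < W)

theorem bfs_sim (land : List (List Int)) (H W : Nat) (idx : Int) (hIdx : 1 ≤ idx) :
    ∀ (f : Nat) (q : List (Nat × Nat)) (vA : List (List Int)) (vB : List (List Bool))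
      (cnt size : Int) (cols : PySem.Set Nat),
    Dims H W vA → RelV vA vB →
    q.length + zerosV vA ≤ f →
    (∀ p ∈ q, atI vA p.1 p.2 = idx ∧ p.1 < H ∧ p.2 < W) →
    cnt = size + (q.length : Int) →
    (∀ j, (∃ i, atI vA i j = idx) ↔ (j ∈ cols ∨ ∃ p ∈ q, p.2 = j)) →
    cols.Nodup → (∀ x ∈ cols, x < W) →
    BfsPost H W idx vA (bfsA land H W idx f q vA cnt) (bfsB land H W f q vB size cols) := by
  intro f
  induction f with
  | zero =>
    intro q vA vB cnt size cols hd hr hfuel hq hcnt hcols hnod hbnd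
    have hq0 : q = [] := by
      cases q with
      | nil => rfl
      | cons a t =>
        exfalso
        rw [List.length_cons] at hfuel
        omega
    subst hq0
    refine ⟨hd, hr, by simpa using hcnt, fun i j => Or.inl rfl, ?_, hnod, hbnd⟩
    intro j
    have := hcols j
    simpa using this
  | succ f ih =>
    intro q vA vB cnt size cols hd hr hfuel hq hcnt hcols hnod hbnd
    cases q with
    | nil =>
      refine ⟨hd, hr, by simpa using hcnt, fun i j => Or.inl rfl, ?_, hnod, hbnd⟩
      intro j
      have := hcols j
      simpa using this
    | cons c q' =>
      have hA : bfsA land H W idx (f + 1) (c :: q') vA cnt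
          = bfsA land H W idx f (offsA.foldl (stepA land H W idx c) (q', vA, cnt)).1
              (offsA.foldl (stepA land H W idx c) (q', vA, cnt)).2.1
              (offsA.foldl (stepA land H W idx c) (q', vA, cnt)).2.2 := rfl
      have hB : bfsB land H W (f + 1) (c :: q') vB size cols
          = bfsB land H W f (offsA.foldl (stepB land H W c) (q', vB)).1
              (offsA.foldl (stepB land H W c) (q', vB)).2 (size + 1) (PySem.Set.add cols c.2) := rfl
      rw [hA, hB]
      obtain ⟨hd2, hr2, hq2, new, hnew1, hnew2, hnew3, hnew4, hnew5, hnew6⟩ :=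
        fold_sim land H W idx hIdx c offsA q' vA vB cnt hd hr
      rw [hq2, hnew1]
      have hqmem : ∀ p ∈ c :: q', atI vA p.1 p.2 = idx ∧ p.1 < H ∧ p.2 < W := hq
      have hpost := ih (q' ++ new) (offsA.foldl (stepA land H W idx c) (q', vA, cnt)).2.1
        (offsA.foldl (stepB land H W c) (q', vB)).2
        (offsA.foldl (stepA land H W idx c) (q', vA, cnt)).2.2
        (size + 1) (PySem.Set.add cols c.2) hd2 hr2
        (by
          rw [List.length_append]
          simp only [List.length_cons] at hfuel
          omega)
        (by
          intro p hp
          rcases List.mem_append.mp hp with h | h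
          · obtain ⟨hm, h1, h2⟩ := hq p (List.mem_cons_of_mem _ h)
            exact ⟨(hnew5 p.1 p.2).mpr (Or.inl hm), h1, h2⟩
          · exact ⟨(hnew5 p.1 p.2).mpr (Or.inr (by simpa using h)), hnew2 p h⟩)
        (by
          rw [hnew3, hcnt]
          simp only [List.length_cons, List.length_append]
          push_cast
          ring)
        (by
          intro j
          rw [PySem.Set.mem_add cols c.2 j]
          constructor
          · rintro ⟨i, hi⟩
            rcases (hnew5 i j).mp hi with h | h
            · rcases (hcols j).mp ⟨i, h⟩ with h | ⟨p, hp, hpj⟩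
              · exact Or.inl (Or.inl h)
              · rcases List.mem_cons.mp hp with h' | h'
                · subst h'; exact Or.inl (Or.inr hpj.symm)
                · exact Or.inr ⟨p, List.mem_append.mpr (Or.inl h'), hpj⟩
            · exact Or.inr ⟨(i, j), List.mem_append.mpr (Or.inr h), rfl⟩
          · rintro (h | ⟨p, hp, hpj⟩)
            · rcases h with h | h
              · obtain ⟨i, hi⟩ := (hcols j).mpr (Or.inl h)
                exact ⟨i, (hnew5 i j).mpr (Or.inl hi)⟩
              · subst h
                obtain ⟨hm, _, _⟩ := hq c (List.mem_cons_self ..)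
                exact ⟨c.1, (hnew5 c.1 c.2).mpr (Or.inl hm)⟩
            · rcases List.mem_append.mp hp with h | h
              · obtain ⟨i, hi⟩ := (hcols j).mpr (Or.inr ⟨p, List.mem_cons_of_mem _ h, hpj⟩)
                exact ⟨i, (hnew5 i j).mpr (Or.inl hi)⟩
              · refine ⟨p.1, (hnew5 p.1 j).mpr (Or.inr ?_)⟩
                have : (p.1, j) = p := by
                  rw [← hpj]
                exact this ▸ h)
        (PySem.Set.nodup_add cols c.2 hnod)
        (by
          intro x hx
          rcases (PySem.Set.mem_add cols c.2 x).mp hx with h | h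
          · exact hbnd x h
          · subst h
            exact (hq c (List.mem_cons_self ..)).2.2)
      obtain ⟨pd, pr, pc, pchg, piff, pnod, pbnd⟩ := hpost
      refine ⟨pd, pr, pc, ?_, piff, pnod, pbnd⟩
      intro i j
      rcases pchg i j with h | ⟨h0, hfin⟩
      · rcases hnew6 i j with h' | ⟨h0', hmid⟩
        · exact Or.inl (h.trans h')
        · exact Or.inr ⟨h0', h.trans hmid⟩
      · rcases hnew6 i j with h' | ⟨h0', hmid⟩
        · exact Or.inr ⟨h'.symm.trans h0, hfin⟩
        · exact Or.inr ⟨h0', hfin⟩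

-- B's 'for c in cols: col_total[c] += size' bucket update, characterised pointwise
theorem ct_fold (sz : Int) : ∀ (cols : List Nat) (ct : List Int), cols.Nodup →
    (∀ c ∈ cols, c < ct.length) →
    (cols.foldl (fun ct c => ct.set c (ct.getD c 0 + sz)) ct).length = ct.length ∧
    ∀ j, (cols.foldl (fun ct c => ct.set c (ct.getD c 0 + sz)) ct).getD j 0
      = ct.getD j 0 + (if j ∈ cols then sz else 0) := by
  intro cols
  induction cols with
  | nil => intro ct _ _; simp
  | cons c rest ih =>
    intro ct hnod hbnd
    rw [List.foldl_cons]
    have hc : c < ct.length := hbnd c (List.mem_cons_self ..)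
    have hlen : (ct.set c (ct.getD c 0 + sz)).length = ct.length := List.length_set ..
    obtain ⟨ihl, ihd⟩ := ih (ct.set c (ct.getD c 0 + sz)) (List.Nodup.of_cons hnod)
      (fun x hx => by rw [hlen]; exact hbnd x (List.mem_cons_of_mem _ hx))
    refine ⟨by rw [ihl, hlen], ?_⟩
    intro j
    rw [ihd j]
    by_cases hjc : j = c
    · subst hjc
      have hjr : j ∉ rest := (List.nodup_cons.mp hnod).1
      rw [List.getD_eq_getElem?_getD, List.getElem?_set_self hc]
      simp [hjr]
    · have : (ct.set c (ct.getD c 0 + sz)).getD j 0 = ct.getD j 0 := by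
        rw [List.getD_eq_getElem?_getD, List.getElem?_set_ne (fun h => hjc h.symm),
          ← List.getD_eq_getElem?_getD]
      rw [this]
      simp [List.mem_cons, hjc]

-- membership in a column, in terms of the total reader atI
theorem mem_colOf {v : List (List Int)} {j : Nat} {u : Int} (hu : u ≠ 0) :
    u ∈ colOf v j ↔ ∃ i, atI v i j = u := by
  constructor
  · intro h
    obtain ⟨r, hr, hru⟩ := List.mem_map.mp h
    obtain ⟨i, hi, hvi⟩ := List.mem_iff_getElem.mp hr
    refine ⟨i, ?_⟩
    unfold atI
    rw [List.getD_eq_getElem _ _ hi, hvi, hru]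
  · rintro ⟨i, hi⟩
    by_cases hlen : i < v.length
    · refine List.mem_map.mpr ⟨v[i], List.getElem_mem hlen, ?_⟩
      unfold atI at hi
      rwa [List.getD_eq_getElem _ _ hlen] at hi
    · rw [atI_zero_of_ge j (by omega)] at hi
      exact absurd hi.symm hu

-- effect of one component (fresh label idx, size cnt) on a column sum
theorem colSum_step (dict : PySem.Dict Int Int) (idx cnt : Int) (colNew colOld : List Int)
    (hOld : ∀ u ∈ colOld, 0 ≤ u ∧ u < idx) (hIdx : 1 ≤ idx) (marked : Prop) [Decidable marked]
    (hmem : ∀ u : Int, u ≠ 0 → (u ∈ colNew ↔ u ∈ colOld ∨ (u = idx ∧ marked))) :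
    colSum (dict.insert idx cnt) colNew = colSum dict colOld + (if marked then cnt else 0) := by
  have hidx0 : idx ≠ 0 := by omega
  have hidxold : idx ∉ colOld := fun h => by have := (hOld idx h).2; omega
  have hcong : ∑ u ∈ colOld.toFinset.erase 0, (dict.insert idx cnt).getD u 0
      = ∑ u ∈ colOld.toFinset.erase 0, dict.getD u 0 := by
    refine Finset.sum_congr rfl ?_
    intro u hu
    have humem : u ∈ colOld := List.mem_toFinset.mp (Finset.mem_of_mem_erase hu)
    have : u ≠ idx := fun h => hidxold (h ▸ humem)
    rw [PySem.Dict.getD_insert, if_neg this]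
  by_cases hm : marked
  · have hset : colNew.toFinset.erase 0 = insert idx (colOld.toFinset.erase 0) := by
      ext u
      simp only [Finset.mem_erase, Finset.mem_insert, List.mem_toFinset]
      constructor
      · rintro ⟨hu0, hu⟩
        rcases (hmem u hu0).mp hu with h | ⟨h, _⟩
        · exact Or.inr ⟨hu0, h⟩
        · exact Or.inl h
      · rintro (h | ⟨hu0, hu⟩)
        · rw [h]
          exact ⟨hidx0, (hmem idx hidx0).mpr (Or.inr ⟨rfl, hm⟩)⟩
        · exact ⟨hu0, (hmem u hu0).mpr (Or.inl hu)⟩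
    unfold colSum
    rw [hset, Finset.sum_insert (by
      intro h
      exact hidxold (List.mem_toFinset.mp (Finset.mem_of_mem_erase h)))]
    rw [PySem.Dict.getD_insert, if_pos rfl, hcong, if_pos hm]
    ring
  · have hset : colNew.toFinset.erase 0 = colOld.toFinset.erase 0 := by
      ext u
      simp only [Finset.mem_erase, List.mem_toFinset]
      constructor
      · rintro ⟨hu0, hu⟩
        rcases (hmem u hu0).mp hu with h | ⟨_, h⟩
        · exact ⟨hu0, h⟩
        · exact absurd h hm
      · rintro ⟨hu0, hu⟩
        exact ⟨hu0, (hmem u hu0).mpr (Or.inl hu)⟩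
    unfold colSum
    rw [hset, hcong, if_neg hm]
    ring

-- A's per-set summing loop only depends on the member set of its (duplicate-free) argument
theorem setSum_eq (dict : PySem.Dict Int Int) (l : List Int) (col : List Int) (hnd : l.Nodup)
    (hm : ∀ x, x ∈ l ↔ x ∈ col) : setSum dict l = colSum dict col := by
  unfold setSum
  have hbody : l.foldl (fun c u => if u == 0 then c else c + dict.getD u 0) 0
      = l.foldl (fun c u => c + (if u = 0 then 0 else dict.getD u 0)) 0 := by
    refine PySem.List.foldl_congr_mem l _ _ 0 ?_
    intro acc x _
    by_cases h : x = 0 <;> simp [h]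
  rw [hbody, PySem.List.foldl_add l (fun u => if u = 0 then 0 else dict.getD u 0) 0]
  rw [← List.sum_toFinset _ hnd]
  have htf : l.toFinset = col.toFinset := by
    ext u
    simp only [List.mem_toFinset]
    exact hm u
  rw [htf]
  unfold colSum
  rw [zero_add]
  have h1 : ∑ u ∈ col.toFinset.erase 0, dict.getD u 0
      = ∑ u ∈ col.toFinset.erase 0, (if u = 0 then 0 else dict.getD u 0) := by
    refine Finset.sum_congr rfl ?_
    intro u hu
    rw [if_neg (Finset.ne_of_mem_erase hu)]
  rw [h1, Finset.sum_erase _ (by simp)]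

theorem foldl_flip_max : ∀ (l : List Int) (a : Int),
    l.foldl (fun m x => max x m) a = l.foldl max a := by
  intro l
  induction l with
  | nil => intro a; rfl
  | cons x t ih => intro a; rw [List.foldl_cons, List.foldl_cons, ih, max_comm]

theorem foldl_max_le_of (l : List Int) : ∀ (a c : Int), a ≤ c → (∀ x ∈ l, x ≤ c) →
    l.foldl max a ≤ c := by
  induction l with
  | nil => intro a c h _; exact h
  | cons x t ih =>
    intro a c ha hx
    rw [List.foldl_cons]
    exact ih _ c (max_le ha (hx x (List.mem_cons_self ..))) (fun y hy => hx y (List.mem_cons_of_mem _ hy))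

theorem foldl_max_eq_of_mem_iff (l₁ l₂ : List Int) (a : Int) (h : ∀ x, x ∈ l₁ ↔ x ∈ l₂) :
    l₁.foldl max a = l₂.foldl max a := by
  have le : ∀ (m₁ m₂ : List Int), (∀ x, x ∈ m₁ ↔ x ∈ m₂) →
      m₁.foldl max a ≤ m₂.foldl max a := by
    intro m₁ m₂ hm
    refine foldl_max_le_of m₁ a _ (PySem.List.le_foldl_max m₂ a).1 ?_
    intro x hx
    exact (PySem.List.le_foldl_max m₂ a).2 x ((hm x).mp hx)
  exact le_antisymm (le l₁ l₂ h) (le l₂ l₁ (fun x => (h x).symm))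

-- the frozenset-dedup loop: its result is a subset of the input covering every input element
theorem dedup_mono (ls : List (PySem.Set Int)) : ∀ (acc : List (PySem.Set Int)) (t : PySem.Set Int),
    t ∈ acc → t ∈ ls.foldl (fun acc s =>
      if acc.any (fun t => PySem.Set.equal t s) then acc else acc ++ [s]) acc := by
  induction ls with
  | nil => intro acc t h; exact h
  | cons s rest ih =>
    intro acc t h
    rw [List.foldl_cons]
    by_cases hc : acc.any (fun t => PySem.Set.equal t s) = true
    · rw [if_pos hc]; exact ih acc t h
    · rw [if_neg hc]; exact ih _ t (List.mem_append.mpr (Or.inl h))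

theorem dedup_sub (ls : List (PySem.Set Int)) : ∀ (acc : List (PySem.Set Int)) (t : PySem.Set Int),
    t ∈ ls.foldl (fun acc s =>
      if acc.any (fun t => PySem.Set.equal t s) then acc else acc ++ [s]) acc →
    t ∈ acc ∨ t ∈ ls := by
  induction ls with
  | nil => intro acc t h; exact Or.inl h
  | cons s rest ih =>
    intro acc t h
    rw [List.foldl_cons] at h
    by_cases hc : acc.any (fun t => PySem.Set.equal t s) = true
    · rw [if_pos hc] at h
      rcases ih acc t h with h | h
      · exact Or.inl h
      · exact Or.inr (List.mem_cons_of_mem _ h)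
    · rw [if_neg hc] at h
      rcases ih _ t h with h | h
      · rcases List.mem_append.mp h with h | h
        · exact Or.inl h
        · exact Or.inr (List.mem_cons.mpr (Or.inl (by simpa using h)))
      · exact Or.inr (List.mem_cons_of_mem _ h)

theorem dedup_covers (ls : List (PySem.Set Int)) : ∀ (acc : List (PySem.Set Int))
    (s : PySem.Set Int), s ∈ ls →
    ∃ t ∈ ls.foldl (fun acc s =>
      if acc.any (fun t => PySem.Set.equal t s) then acc else acc ++ [s]) acc,
      PySem.Set.equal t s = true := by
  induction ls with
  | nil => intro acc s h; simp at h
  | cons s0 rest ih =>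
    intro acc s hs
    rw [List.foldl_cons]
    rcases List.mem_cons.mp hs with h | h
    · subst h
      by_cases hc : acc.any (fun t => PySem.Set.equal t s) = true
      · rw [if_pos hc]
        obtain ⟨t, ht, hts⟩ := List.any_eq_true.mp hc
        exact ⟨t, dedup_mono rest acc t ht, hts⟩
      · rw [if_neg hc]
        refine ⟨s, dedup_mono rest _ s (List.mem_append.mpr (Or.inr (List.mem_singleton.mpr rfl))), ?_⟩
        rw [PySem.Set.equal_iff]
        intro x
        rfl
    · by_cases hc : acc.any (fun t => PySem.Set.equal t s0) = true
      · rw [if_pos hc]; exact ih acc s h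
      · rw [if_neg hc]; exact ih _ s h

-- lock-step preservation of an invariant through two folds over the same index list
theorem fold2 {σA σB γ : Type} (fA : σA → γ → σA) (fB : σB → γ → σB) (P : σA → σB → Prop) :
    ∀ (l : List γ) (sA : σA) (sB : σB), P sA sB →
    (∀ x ∈ l, ∀ a b, P a b → P (fA a x) (fB b x)) →
    P (l.foldl fA sA) (l.foldl fB sB) := by
  intro l
  induction l with
  | nil => intro sA sB h _; exact h
  | cons x t ih =>
    intro sA sB h hstep
    rw [List.foldl_cons, List.foldl_cons]
    exact ih _ _ (hstep x (List.mem_cons_self ..) sA sB h)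
      (fun y hy => hstep y (List.mem_cons_of_mem _ hy))

theorem zerosV_le {H W : Nat} {v : List (List Int)} (hd : Dims H W v) : zerosV v ≤ H * W := by
  unfold zerosV
  calc (v.map (fun r => r.count 0)).sum ≤ (v.map (fun _ => W)).sum := by
        refine List.sum_le_sum ?_
        intro r hr
        rw [← hd.2 r hr]
        exact List.count_le_length
    _ = H * W := by
        rw [List.map_const', List.sum_replicate, smul_eq_mul, hd.1, mul_comm]

theorem colOf_mem_exists {v : List (List Int)} {j : Nat} {u : Int} (h : u ∈ colOf v j) :
    ∃ i, atI v i j = u := by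
  obtain ⟨r, hr, hru⟩ := List.mem_map.mp h
  obtain ⟨i, hi, hvi⟩ := List.mem_iff_getElem.mp hr
  refine ⟨i, ?_⟩
  unfold atI
  rw [List.getD_eq_getElem _ _ hi, hvi, hru]

-- the outer-loop invariant between A's (visited, cnt_dict, idx) and B's (visited, col_total)
def OI (H W : Nat) (a : List (List Int) × PySem.Dict Int Int × Int)
    (b : List (List Bool) × List Int) : Prop :=
  Dims H W a.1 ∧ RelV a.1 b.1 ∧ 1 ≤ a.2.2 ∧
  (∀ i j, 0 ≤ atI a.1 i j ∧ atI a.1 i j < a.2.2) ∧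
  b.2.length = W ∧
  (∀ j, j < W → b.2.getD j 0 = colSum a.2.1 (colOf a.1 j))

theorem cell_pres (land : List (List Int)) (H W i j : Nat) (hi : i < H) (hj : j < W)
    (a : List (List Int) × PySem.Dict Int Int × Int) (b : List (List Bool) × List Int)
    (h : OI H W a b) :
    OI H W
      (if (atI land i j != 0) && (atI a.1 i j == 0) then
        ((bfsA land H W a.2.2 (H * W + 1) [(i, j)] (setI a.1 i j a.2.2) 1).1,
         a.2.1.insert a.2.2 (bfsA land H W a.2.2 (H * W + 1) [(i, j)] (setI a.1 i j a.2.2) 1).2,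
         a.2.2 + 1)
       else a)
      (if (atI land i j != 0) && !(atB b.1 i j) then
        ((bfsB land H W (H * W + 1) [(i, j)] (setB b.1 i j true) 0 PySem.Set.empty).1,
         (bfsB land H W (H * W + 1) [(i, j)] (setB b.1 i j true) 0 PySem.Set.empty).2.2.foldl
           (fun ct c => ct.set c (ct.getD c 0
             + (bfsB land H W (H * W + 1) [(i, j)] (setB b.1 i j true) 0 PySem.Set.empty).2.1)) b.2)
       else b) := by
  obtain ⟨hd, hr, hidx1, hbound, hlen, hcs⟩ := h
  have hguard : ((atI land i j != 0) && !(atB b.1 i j))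
      = ((atI land i j != 0) && (atI a.1 i j == 0)) := by
    rw [atB_rel hr, Bool.not_not]
  rw [hguard]
  by_cases hg : ((atI land i j != 0) && (atI a.1 i j == 0)) = true
  case neg =>
    rw [if_neg hg, if_neg hg]
    exact ⟨hd, hr, hidx1, hbound, hlen, hcs⟩
  case pos =>
    rw [if_pos hg, if_pos hg]
    have hvis0 : atI a.1 i j = 0 := by
      simp only [Bool.and_eq_true, beq_iff_eq] at hg
      exact hg.2
    have hidx0 : a.2.2 ≠ 0 := by omega
    have hi' : i < a.1.length := hd.1 ▸ hi
    have hrow : j < (a.1.getD i []).length := by rw [row_len hd hi]; exact hj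
    have hd1 : Dims H W (setI a.1 i j a.2.2) := dims_set hd i j a.2.2 hi'
    have hrel1 : RelV (setI a.1 i j a.2.2) (setB b.1 i j true) := by
      have := relV_set hr i j a.2.2
      rwa [show (!(a.2.2 == 0)) = true by simp [hidx0]] at this
    have hat1 : ∀ i0 j0, atI (setI a.1 i j a.2.2) i0 j0
        = if i0 = i ∧ j0 = j then a.2.2 else atI a.1 i0 j0 :=
      fun i0 j0 => atI_set a.1 i j a.2.2 i0 j0 hi' hrow
    obtain ⟨pd, pr, pc, pchg, piff, pnod, pbnd⟩ :=
      bfs_sim land H W a.2.2 hidx1 (H * W + 1) [(i, j)] (setI a.1 i j a.2.2)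
        (setB b.1 i j true) 1 0 PySem.Set.empty hd1 hrel1
        (by
          have := zerosV_le hd1
          simp only [List.length_cons, List.length_nil]
          omega)
        (by
          intro p hp
          rw [List.mem_singleton] at hp
          subst hp
          exact ⟨by rw [hat1]; simp, hi, hj⟩)
        (by simp)
        (by
          intro j0
          constructor
          · rintro ⟨i0, hi0⟩
            rw [hat1] at hi0
            by_cases hc : i0 = i ∧ j0 = j
            · exact Or.inr ⟨(i, j), List.mem_singleton.mpr rfl, hc.2.symm⟩
            · rw [if_neg hc] at hi0
              have := (hbound i0 j0).2
              omega
          · rintro (h | ⟨p, hp, hpj⟩)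
            · simp [PySem.Set.empty] at h
            · rw [List.mem_singleton] at hp
              subst hp
              exact ⟨i, by rw [hat1, if_pos ⟨rfl, hpj.symm ▸ rfl⟩]⟩)
        List.nodup_nil
        (by intro x hx; simp [PySem.Set.empty] at hx)
    -- global change of A's visited relative to the pre-seed grid
    have hchg : ∀ i0 j0,
        atI (bfsA land H W a.2.2 (H * W + 1) [(i, j)] (setI a.1 i j a.2.2) 1).1 i0 j0
          = atI a.1 i0 j0 ∨
        (atI a.1 i0 j0 = 0 ∧
          atI (bfsA land H W a.2.2 (H * W + 1) [(i, j)] (setI a.1 i j a.2.2) 1).1 i0 j0 = a.2.2) := by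
      intro i0 j0
      rcases pchg i0 j0 with hq | ⟨h0, hfin⟩
      · rw [hq, hat1]
        by_cases hc : i0 = i ∧ j0 = j
        · rw [if_pos hc]
          exact Or.inr ⟨by rw [hc.1, hc.2]; exact hvis0, rfl⟩
        · rw [if_neg hc]
          exact Or.inl rfl
      · rw [hat1] at h0
        by_cases hc : i0 = i ∧ j0 = j
        · rw [if_pos hc] at h0
          omega
        · rw [if_neg hc] at h0
          exact Or.inr ⟨h0, hfin⟩
    obtain ⟨hctlen, hctget⟩ := ct_fold
      (bfsB land H W (H * W + 1) [(i, j)] (setB b.1 i j true) 0 PySem.Set.empty).2.1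
      (bfsB land H W (H * W + 1) [(i, j)] (setB b.1 i j true) 0 PySem.Set.empty).2.2
      b.2 pnod (fun c hc => by rw [hlen]; exact pbnd c hc)
    refine ⟨pd, pr, by simp only []; omega, ?_, ?_, ?_⟩
    · intro i0 j0
      rcases hchg i0 j0 with hq | ⟨h0, hfin⟩
      · simp only []
        rw [hq]
        have := hbound i0 j0
        omega
      · simp only []
        rw [hfin]
        omega
    · simp only []
      rw [hctlen]
      exact hlen
    · intro j0 hj0
      simp only []
      rw [hctget j0, hcs j0 hj0]
      have hstep := colSum_step a.2.1 a.2.2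
        (bfsA land H W a.2.2 (H * W + 1) [(i, j)] (setI a.1 i j a.2.2) 1).2
        (colOf (bfsA land H W a.2.2 (H * W + 1) [(i, j)] (setI a.1 i j a.2.2) 1).1 j0)
        (colOf a.1 j0)
        (by
          intro u hu
          obtain ⟨i0, hi0⟩ := colOf_mem_exists hu
          exact hi0 ▸ hbound i0 j0)
        hidx1
        (j0 ∈ (bfsB land H W (H * W + 1) [(i, j)] (setB b.1 i j true) 0 PySem.Set.empty).2.2)
        (by
          intro u hu
          rw [mem_colOf hu, mem_colOf hu]
          constructor
          · rintro ⟨i0, hi0⟩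
            rcases hchg i0 j0 with hq | ⟨h0, hfin⟩
            · exact Or.inl ⟨i0, hq ▸ hi0⟩
            · exact Or.inr ⟨by rw [← hi0]; exact hfin, (piff j0).mp ⟨i0, hfin⟩⟩
          · rintro (⟨i0, hi0⟩ | ⟨hu1, hmk⟩)
            · refine ⟨i0, ?_⟩
              rcases hchg i0 j0 with hq | ⟨h0, hfin⟩
              · rw [hq, hi0]
              · rw [h0] at hi0
                exact absurd hi0.symm hu
            · obtain ⟨i0, hi0⟩ := (piff j0).mpr hmk
              exact ⟨i0, hu1 ▸ hi0⟩)
      rw [hstep, pc]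
    
theorem atI_replicate (H W i j : Nat) : atI (List.replicate H (List.replicate W (0 : Int))) i j = 0 := by
  have h1 : (List.replicate H (List.replicate W (0 : Int))).getD i []
      = if i < H then List.replicate W (0 : Int) else [] := by
    rw [List.getD_eq_getElem?_getD, List.getElem?_replicate]
    split_ifs <;> rfl
  unfold atI
  rw [h1]
  by_cases hi : i < H
  · rw [if_pos hi, List.getD_eq_getElem?_getD, List.getElem?_replicate]
    split_ifs <;> rfl
  · rw [if_neg hi]
    rfl

theorem final_phase (W : Nat) (vF : List (List Int)) (dict : PySem.Dict Int Int) (ct : List Int)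
    (hlen : ct.length = W)
    (hcs : ∀ j, j < W → ct.getD j 0 = colSum dict (colOf vF j)) :
    (dedupSets ((List.range W).map (fun j => PySem.Set.ofList (colOf vF j)))).foldl
      (fun m s => max (setSum dict s) m) 0 = ct.foldl (fun b t => max b t) 0 := by
  have hA : (dedupSets ((List.range W).map (fun j => PySem.Set.ofList (colOf vF j)))).foldl
      (fun m s => max (setSum dict s) m) 0
      = ((dedupSets ((List.range W).map (fun j => PySem.Set.ofList (colOf vF j)))).map
          (setSum dict)).foldl (fun m x => max x m) 0 := by
    rw [List.foldl_map]
  rw [hA, foldl_flip_max]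
  have hB : ct.foldl (fun b t => max b t) 0 = ct.foldl max 0 := rfl
  rw [hB]
  apply foldl_max_eq_of_mem_iff
  intro x
  constructor
  · intro hx
    obtain ⟨s, hs, rfl⟩ := List.mem_map.mp hx
    rcases dedup_sub _ [] s hs with h | h
    · simp at h
    · obtain ⟨j, hjR, rfl⟩ := List.mem_map.mp h
      have hjW : j < W := List.mem_range.mp hjR
      have hval : setSum dict (PySem.Set.ofList (colOf vF j)) = colSum dict (colOf vF j) :=
        setSum_eq dict _ _ (PySem.Set.nodup_ofList _) (fun y => PySem.Set.mem_ofList _ y)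
      rw [hval, ← hcs j hjW, List.getD_eq_getElem _ _ (by omega)]
      exact List.getElem_mem _
  · intro hx
    obtain ⟨j, hjlen, rfl⟩ := List.mem_iff_getElem.mp hx
    have hjW : j < W := by omega
    have hsmem : PySem.Set.ofList (colOf vF j)
        ∈ (List.range W).map (fun j => PySem.Set.ofList (colOf vF j)) :=
      List.mem_map.mpr ⟨j, List.mem_range.mpr hjW, rfl⟩
    obtain ⟨t, ht, heq⟩ := dedup_covers _ [] _ hsmem
    refine List.mem_map.mpr ⟨t, ht, ?_⟩
    have htl : t ∈ (List.range W).map (fun j => PySem.Set.ofList (colOf vF j)) := by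
      rcases dedup_sub _ [] t ht with h | h
      · simp at h
      · exact h
    obtain ⟨j', _, hjt⟩ := List.mem_map.mp htl
    have htnod : t.Nodup := hjt ▸ PySem.Set.nodup_ofList _
    have hmemt : ∀ y, y ∈ t ↔ y ∈ colOf vF j := by
      intro y
      have h1 := (PySem.Set.equal_iff t _).mp heq y
      rw [h1, PySem.Set.mem_ofList]
    rw [setSum_eq dict t (colOf vF j) htnod hmemt, ← hcs j hjW,
      List.getD_eq_getElem _ _ (by omega)]

theorem main_eq (land : List (List Int)) : solution land = solution_alt land := by
  have hOI : OI land.length (land.headD []).length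
      (fillA land land.length (land.headD []).length)
      ((List.range land.length).foldl (fun st i =>
        (List.range (land.headD []).length).foldl (fun (st : List (List Bool) × List Int) j =>
          if (atI land i j != 0) && !(atB st.1 i j) then
            let r := bfsB land land.length (land.headD []).length
              (land.length * (land.headD []).length + 1) [(i, j)] (setB st.1 i j true) 0 PySem.Set.empty
            (r.1, r.2.2.foldl (fun ct c => ct.set c (ct.getD c 0 + r.2.1)) st.2)
          else st) st)
        (List.replicate land.length (List.replicate (land.headD []).length false),
         List.replicate (land.headD []).length (0 : Int))) := by
    unfold fillA
    refine fold2 _ _ (OI land.length (land.headD []).length) (List.range land.length) _ _ ?_ ?_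
    · refine ⟨⟨by simp, by intro r hr; rw [List.eq_of_mem_replicate hr]; simp⟩, ?_, le_refl 1, ?_, by simp, ?_⟩
      · show List.replicate land.length (List.replicate (land.headD []).length false) = _
        simp [List.map_replicate]
      · intro i j
        rw [atI_replicate]
        exact ⟨le_refl 0, one_pos⟩
      · intro j hj
        have h1 : (List.replicate (land.headD []).length (0 : Int)).getD j 0 = 0 := by
          rw [List.getD_eq_getElem _ _ (by simpa using hj), List.getElem_replicate]
        rw [h1]
        have h2 : (colOf (List.replicate land.length (List.replicate (land.headD []).length (0:Int))) j).toFinset.erase 0 = ∅ := by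
          ext u
          simp only [Finset.mem_erase, List.mem_toFinset, Finset.notMem_empty, iff_false, not_and]
          intro hu0 hu
          obtain ⟨i0, hi0⟩ := colOf_mem_exists hu
          rw [atI_replicate] at hi0
          exact hu0 hi0.symm
        unfold colSum
        rw [h2, Finset.sum_empty]
    · intro i hiR aa bb hab
      refine fold2 _ _ (OI land.length (land.headD []).length) (List.range (land.headD []).length) _ _ hab ?_
      intro j hjR a b hab'
      exact cell_pres land land.length (land.headD []).length i j
        (List.mem_range.mp hiR) (List.mem_range.mp hjR) a b hab'
  obtain ⟨hd, hr, hidx1, hbound, hlen, hcs⟩ := hOI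
  show (dedupSets ((List.range (land.headD []).length).map
      (fun j => PySem.Set.ofList (colOf (fillA land land.length (land.headD []).length).1 j)))).foldl
      (fun m s => max (setSum (fillA land land.length (land.headD []).length).2.1 s) m) 0
    = ((List.range land.length).foldl (fun st i =>
        (List.range (land.headD []).length).foldl (fun (st : List (List Bool) × List Int) j =>
          if (atI land i j != 0) && !(atB st.1 i j) then
            let r := bfsB land land.length (land.headD []).length
              (land.length * (land.headD []).length + 1) [(i, j)] (setB st.1 i j true) 0 PySem.Set.empty
            (r.1, r.2.2.foldl (fun ct c => ct.set c (ct.getD c 0 + r.2.1)) st.2)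
          else st) st)
        (List.replicate land.length (List.replicate (land.headD []).length false),
         List.replicate (land.headD []).length (0 : Int))).2.foldl (fun b t => max b t) 0
  exact final_phase (land.headD []).length _ _ _ hlen hcs

theorem solution_spec : Claim_equal_solution := by
  intro land _ _
  show solution land = solution_alt land
  exact main_eq land
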